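-- pv_equiv track=rewrite | github.com/kaae-2/ob-pipeline-metrics | flow_metrics.py | parse_metric_argument
-- ===== SOURCE A (Python) =====
-- VALID_METRICS = {
--     "accuracy",
--     "precision",
--     "recall",
--     "f1",
--     "f1_score",
--     "runtime",
--     "overlap",
--     "scalability",
--     "all",
-- }
--
-- def parse_metric_argument(metric_arg):
--     metrics = [m.strip().lower() for m in metric_arg.split(",") if m.strip()]
--     if not metrics:
--         raise ValueError("No metrics provided.")
--     if "all" in metrics:
--         metrics = sorted([m for m in VALID_METRICS if m != "all"])
--     # Normalize aliases
--     metrics = ["f1" if m == "f1_score" else m for m in metrics]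
--     metrics = list(dict.fromkeys(metrics))  # drop duplicates while preserving order
--     invalid = [m for m in metrics if m not in VALID_METRICS]
--     if invalid:
--         raise ValueError(f"Invalid metric(s): {', '.join(invalid)}")
--     return metrics
-- ===== SOURCE B (Python) =====
-- VALID_METRICS = {
--     "accuracy",
--     "precision",
--     "recall",
--     "f1",
--     "f1_score",
--     "runtime",
--     "overlap",
--     "scalability",
--     "all",
-- }
--
-- _ALL_EXPANSION = ["accuracy", "f1", "overlap", "precision", "recall", "runtime", "scalability"]
--
--
-- def parse_metric_argument(metric_arg):
--     # Single pass over the comma-separated parts: normalize, alias, dedup via a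
--     # seen-set and collect invalids all at once; 'all' short-circuits to the
--     # precomputed expansion.
--     result = []
--     seen = set()
--     invalid = []
--     saw_any = False
--     for part in metric_arg.split(","):
--         tok = part.strip()
--         if not tok:
--             continue
--         tok = tok.lower()
--         saw_any = True
--         if tok == "all":
--             return list(_ALL_EXPANSION)
--         tok = "f1" if tok == "f1_score" else tok
--         if tok in seen:
--             continue
--         seen.add(tok)
--         result.append(tok)
--         if tok not in VALID_METRICS:
--             invalid.append(tok)
--     if not saw_any:
--         raise ValueError("No metrics provided.")
--     if invalid:
--         raise ValueError(f"Invalid metric(s): {', '.join(invalid)}")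
--     return result
-- ===== Notes on version B (the rewrite author's own statement) =====
-- stated objective: alternative
-- what changed: Replaced A's five sequential list passes (split/strip comprehension, all-check, alias map, dict.fromkeys dedup, invalid filter) by a single fused loop over the parts maintaining an ordered result, a seen-set and an invalid list, with 'all' short-circuiting to a precomputed expansion.
import Mathlib
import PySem

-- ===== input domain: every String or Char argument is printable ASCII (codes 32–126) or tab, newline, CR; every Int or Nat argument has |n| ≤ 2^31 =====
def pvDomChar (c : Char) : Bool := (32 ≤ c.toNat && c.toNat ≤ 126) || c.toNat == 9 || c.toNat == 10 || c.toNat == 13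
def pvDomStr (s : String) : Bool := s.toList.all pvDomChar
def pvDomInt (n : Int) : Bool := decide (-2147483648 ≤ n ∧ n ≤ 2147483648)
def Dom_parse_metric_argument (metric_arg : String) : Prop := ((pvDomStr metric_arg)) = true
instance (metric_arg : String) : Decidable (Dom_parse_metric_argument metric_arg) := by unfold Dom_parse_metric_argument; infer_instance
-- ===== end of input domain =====

-- B fuses A's five list passes into one loop (ordered result + seen-set + invalid list,
-- 'all' short-circuits to a precomputed expansion); same return value wherever A returns.

-- shared constant: the Python set VALID_METRICS
def pmaValid : PySem.Set String :=
  PySem.Set.ofList ["accuracy", "precision", "recall", "f1", "f1_score",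
                    "runtime", "overlap", "scalability", "all"]

-- metric_arg.split(",")  (sep is the non-empty literal ",", so split? is some)
def pmaParts (metric_arg : String) : List String :=
  (PySem.Str.split? metric_arg ",").getD []

-- the tokens a list of parts yields: [m.strip().lower() for m in parts if m.strip()]
def pmaToksOf (parts : List String) : List String :=
  parts.filterMap
    (fun m => if PySem.Str.strip m = "" then none else some (PySem.Str.lower (PySem.Str.strip m)))

def pmaTokens (metric_arg : String) : List String := pmaToksOf (pmaParts metric_arg)

-- ===== PORT A =====
def parse_metric_argument (metric_arg : String) : List String :=
  let metrics := pmaTokens metric_arg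
  if metrics = [] then []   -- raise ValueError("No metrics provided.")  (excluded by Pre_)
  else
    let metrics1 := if metrics.contains "all"
      then PySem.List.sorted (pmaValid.filter (fun m => !(m == "all"))) (fun x => x) false
      else metrics
    let metrics2 := metrics1.map (fun m => if m = "f1_score" then "f1" else m)
    let metrics3 := PySem.List.dedup metrics2
    let invalid := metrics3.filter (fun m => !(pmaValid.contains m))
    if invalid ≠ [] then [] else metrics3   -- raise on invalid ≠ [] (excluded by Pre_)

-- ===== PORT B =====
def pmaAllExpansion : List String :=
  ["accuracy", "f1", "overlap", "precision", "recall", "runtime", "scalability"]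

-- the single fused loop of Source B
def pmaLoop : List String → List String → PySem.Set String → List String → Bool → List String
  | [], result, _seen, invalid, sawAny =>
      if sawAny = false then []          -- raise ValueError("No metrics provided.")
      else if invalid ≠ [] then []       -- raise ValueError("Invalid metric(s): …")
      else result
  | part :: rest, result, seen, invalid, sawAny =>
      let tok := PySem.Str.strip part
      if tok = "" then pmaLoop rest result seen invalid sawAny
      else
        let tok := PySem.Str.lower tok
        if tok = "all" then pmaAllExpansion
        else
          let tok := if tok = "f1_score" then "f1" else tok
          if PySem.Set.contains seen tok then pmaLoop rest result seen invalid true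
          else pmaLoop rest (result ++ [tok]) (PySem.Set.add seen tok)
                 (if pmaValid.contains tok then invalid else invalid ++ [tok]) true

def parse_metric_argument_alt (metric_arg : String) : List String :=
  pmaLoop (pmaParts metric_arg) [] PySem.Set.empty [] false

-- ===== PRECONDITION & SPEC =====
-- Pre_ excludes exactly the inputs where A raises ValueError: no non-empty token at all,
-- or some token invalid while 'all' is absent.
def Pre_parse_metric_argument (metric_arg : String) : Prop :=
  pmaTokens metric_arg ≠ [] ∧
    ("all" ∈ pmaTokens metric_arg ∨ ∀ m ∈ pmaTokens metric_arg, m ∈ pmaValid)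
instance (metric_arg : String) : Decidable (Pre_parse_metric_argument metric_arg) := by
  unfold Pre_parse_metric_argument; infer_instance

def pvWitness_parse_metric_argument : String := "f1_score, Recall,f1"

def Spec_parse_metric_argument (metric_arg : String) (out : List String) : Prop :=
  out = parse_metric_argument_alt metric_arg
instance (metric_arg : String) (out : List String) : Decidable (Spec_parse_metric_argument metric_arg out) := by
  unfold Spec_parse_metric_argument; infer_instance

-- ===== CLAIM (what is proved, stated in full; the proofs are below) =====
def Claim_equal_parse_metric_argument : Prop :=
  ∀ (metric_arg : String), Dom_parse_metric_argument metric_arg →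
    Pre_parse_metric_argument metric_arg →
    Spec_parse_metric_argument metric_arg (parse_metric_argument metric_arg)

-- ===== LEMMAS AND PROOFS =====

lemma pmaToksOf_nil : pmaToksOf [] = [] := rfl

lemma pmaToksOf_cons (p : String) (rest : List String) :
    pmaToksOf (p :: rest) =
      if PySem.Str.strip p = "" then pmaToksOf rest
      else PySem.Str.lower (PySem.Str.strip p) :: pmaToksOf rest := by
  simp only [pmaToksOf, List.filterMap_cons]
  split <;> simp_all

-- the alias of a valid metric is valid
lemma pmaAlias_valid {m : String} (h : m ∈ pmaValid) :
    (if m = "f1_score" then "f1" else m) ∈ pmaValid := by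
  by_cases hm : m = "f1_score" <;> simp [hm] <;> first | decide | exact h

-- if some part yields the token "all", B's loop returns the expansion
lemma pmaLoop_of_all : ∀ (parts : List String) (result seen invalid : List String) (sawAny : Bool),
    "all" ∈ pmaToksOf parts →
    pmaLoop parts result seen invalid sawAny = pmaAllExpansion := by
  intro parts
  induction parts with
  | nil => intro _ _ _ _ h; simp [pmaToksOf_nil] at h
  | cons part rest ih =>
    intro result seen invalid sawAny h
    rw [pmaToksOf_cons] at h
    by_cases he : PySem.Str.strip part = ""
    · rw [if_pos he] at h
      simp only [pmaLoop, if_pos he]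
      exact ih _ _ _ _ h
    · rw [if_neg he] at h
      by_cases ha : PySem.Str.lower (PySem.Str.strip part) = "all"
      · simp [pmaLoop, he, ha]
      · have h' : "all" ∈ pmaToksOf rest := by
          rcases List.mem_cons.mp h with h | h
          · exact absurd h.symm ha
          · exact h
        simp only [pmaLoop, if_neg he, if_neg ha]
        split <;> try split
        all_goals exact ih _ _ _ _ h'

-- the dedup/alias step of both sides
def pmaStep (acc : List String) (m : String) : List String :=
  PySem.Set.add acc (if m = "f1_score" then "f1" else m)

-- B's loop, on valid tokens without "all", computes the fold of pmaStep
lemma pmaLoop_of_valid : ∀ (parts : List String) (result invalid : List String) (sawAny : Bool),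
    (∀ m ∈ pmaToksOf parts, m ∈ pmaValid ∧ m ≠ "all") →
    pmaLoop parts result result invalid sawAny =
      (if (sawAny || !(pmaToksOf parts).isEmpty) = false then []
       else if invalid ≠ [] then []
       else List.foldl pmaStep result (pmaToksOf parts)) := by
  intro parts
  induction parts with
  | nil => intro result invalid sawAny _; cases sawAny <;> simp [pmaLoop, pmaToksOf_nil]
  | cons part rest ih =>
    intro result invalid sawAny h
    rw [pmaToksOf_cons] at h ⊢
    by_cases he : PySem.Str.strip part = ""
    · rw [if_pos he] at h ⊢
      simpa [pmaLoop, he] using ih result invalid sawAny h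
    · rw [if_neg he] at h ⊢
      have htok := h (PySem.Str.lower (PySem.Str.strip part)) (List.mem_cons_self ..)
      have ha : PySem.Str.lower (PySem.Str.strip part) ≠ "all" := htok.2
      have hrest : ∀ m ∈ pmaToksOf rest, m ∈ pmaValid ∧ m ≠ "all" := by
        intro m hm; exact h m (List.mem_cons_of_mem _ hm)
      have hval : (if PySem.Str.lower (PySem.Str.strip part) = "f1_score" then "f1"
          else PySem.Str.lower (PySem.Str.strip part)) ∈ pmaValid := pmaAlias_valid htok.1
      simp only [pmaLoop, if_neg he, if_neg ha]
      have hvc : pmaValid.contains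
          (if PySem.Str.lower (PySem.Str.strip part) = "f1_score" then "f1"
           else PySem.Str.lower (PySem.Str.strip part)) = true := by
        simpa using hval
      by_cases hm : (if PySem.Str.lower (PySem.Str.strip part) = "f1_score" then "f1"
           else PySem.Str.lower (PySem.Str.strip part)) ∈ result
      · have hc : PySem.Set.contains result
            (if PySem.Str.lower (PySem.Str.strip part) = "f1_score" then "f1"
             else PySem.Str.lower (PySem.Str.strip part)) = true := by simpa using hm
        rw [if_pos hc, ih result invalid true hrest]
        simp [pmaStep, PySem.Set.add, hm]
      · rw [if_neg (by simpa using hm), if_pos hvc]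
        have hadd : PySem.Set.add result
            (if PySem.Str.lower (PySem.Str.strip part) = "f1_score" then "f1"
             else PySem.Str.lower (PySem.Str.strip part)) =
            result ++ [(if PySem.Str.lower (PySem.Str.strip part) = "f1_score" then "f1"
             else PySem.Str.lower (PySem.Str.strip part))] := by
          simp [PySem.Set.add, hm]
        rw [hadd, ih _ invalid true hrest]
        simp [pmaStep, PySem.Set.add, hm]

-- A's pipeline (alias map then dedup) is the same fold
lemma pmaDedup_map_eq (ts : List String) :
    PySem.List.dedup (ts.map (fun m => if m = "f1_score" then "f1" else m)) =
      List.foldl pmaStep [] ts := by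
  rw [PySem.List.dedup_eq_ofList, PySem.Set.ofList_eq_foldl, List.foldl_map]
  rfl

-- all elements of the fold come from the alias image, hence are valid
lemma pmaFold_valid (ts : List String) (h : ∀ m ∈ ts, m ∈ pmaValid) :
    ∀ x ∈ List.foldl pmaStep [] ts, x ∈ pmaValid := by
  rw [← pmaDedup_map_eq]
  intro x hx
  rw [PySem.List.mem_dedup] at hx
  rcases List.mem_map.mp hx with ⟨m, hm, rfl⟩
  exact pmaAlias_valid (h m hm)

-- ===== VERDICT (by name: the statement is the Claim_ definition above) =====
theorem parse_metric_argument_spec : Claim_equal_parse_metric_argument := by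
  intro s _ hpre
  obtain ⟨hne, hvalid⟩ := hpre
  unfold pmaTokens at hne hvalid
  unfold Spec_parse_metric_argument parse_metric_argument parse_metric_argument_alt
  simp only [pmaTokens, PySem.Set.empty]
  by_cases hall : "all" ∈ pmaToksOf (pmaParts s)
  · -- 'all' branch: both sides are the fixed expansion
    rw [pmaLoop_of_all _ _ _ _ _ hall]
    have hc : (pmaToksOf (pmaParts s)).contains "all" = true := List.elem_eq_true_of_mem hall
    have hsort : PySem.List.sorted (pmaValid.filter (fun m => !(m == "all"))) (fun x => x) false =
        ["accuracy", "f1", "f1_score", "overlap", "precision", "recall", "runtime", "scalability"] := by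
      refine PySem.List.sorted_eq_of_perm_of_pairwise_lt _ _ (fun x : String => x) ?_ ?_
      · decide
      · simp
        decide
    rw [if_neg hne, if_pos hc, hsort]
    decide
  · -- no 'all': all tokens are valid
    have hv : ∀ m ∈ pmaToksOf (pmaParts s), m ∈ pmaValid ∧ m ≠ "all" := by
      intro m hm
      rcases hvalid with h | h
      · exact absurd h hall
      · exact ⟨h m hm, fun hm' => hall (hm' ▸ hm)⟩
    rw [pmaLoop_of_valid _ _ _ _ hv]
    have hE : (pmaToksOf (pmaParts s)).isEmpty = false := by
      simp [hne]
    rw [hE]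
    simp only [Bool.false_or, Bool.not_false]
    have hcall : (pmaToksOf (pmaParts s)).contains "all" = false := by
      simp [List.contains_eq_mem]; exact hall
    rw [if_neg hne, hcall]
    simp only [if_false, Bool.false_eq_true]
    rw [pmaDedup_map_eq]
    have hflt : (List.foldl pmaStep [] (pmaToksOf (pmaParts s))).filter
        (fun m => !(pmaValid.contains m)) = [] := by
      rw [List.filter_eq_nil_iff]
      intro x hx
      have := pmaFold_valid _ (fun m hm => (hv m hm).1) x hx
      simp [List.contains_eq_mem]; exact this
    rw [hflt]
    simp
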